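-- pv_equiv track=rewrite | github.com/ttlalok/Colored_Operads_Quadraticity | tree_polynomial.py | reduce_input
-- ===== SOURCE A (Python) =====
-- def reduce_input(trees, coeffs):
--     added = [False] * len(trees)
--     res_trees = []
--     res_coeffs = []
--     for i, tree1 in enumerate(trees):
--         if not added[i]:
--             for j, tree2 in enumerate(trees):
--                 if i != j:
--                     if tree1 == tree2:
--                         added[i] = True
--                         added[j] = True
--                         cf = coeffs[i] + coeffs[j]
--                         if cf != 0:
--                             res_trees.append(tree1)
--                             res_coeffs.append(cf)
--     for i, tree in enumerate(trees):
--         if not added[i]: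
--             res_trees.append(tree)
--             res_coeffs.append(coeffs[i])
--     return res_trees, res_coeffs
-- ===== SOURCE B (Python) =====
-- def reduce_input(trees, coeffs):
--     # Group indices by tree value in one pass, then emit per group.
--     groups = {}
--     for i, t in enumerate(trees):
--         groups.setdefault(t, []).append(i)
--     res_trees = []
--     res_coeffs = []
--     singles = []
--     for t, idxs in groups.items():
--         if len(idxs) > 1:
--             first = idxs[0]
--             for j in idxs[1:]:
--                 cf = coeffs[first] + coeffs[j]
--                 if cf != 0:
--                     res_trees.append(t)
--                     res_coeffs.append(cf)
--         else:
--             singles.append(idxs[0])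
--     for i in singles:
--         res_trees.append(trees[i])
--         res_coeffs.append(coeffs[i])
--     return res_trees, res_coeffs
-- ===== Notes on version B (the rewrite author's own statement) =====
-- stated objective: faster
-- what changed: Replaces the quadratic scan-all-pairs-with-a-flags-array by a single pass that groups indices by tree value in a dict, then emits each duplicate group's pairs and the singletons from the groups.
import Mathlib
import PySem

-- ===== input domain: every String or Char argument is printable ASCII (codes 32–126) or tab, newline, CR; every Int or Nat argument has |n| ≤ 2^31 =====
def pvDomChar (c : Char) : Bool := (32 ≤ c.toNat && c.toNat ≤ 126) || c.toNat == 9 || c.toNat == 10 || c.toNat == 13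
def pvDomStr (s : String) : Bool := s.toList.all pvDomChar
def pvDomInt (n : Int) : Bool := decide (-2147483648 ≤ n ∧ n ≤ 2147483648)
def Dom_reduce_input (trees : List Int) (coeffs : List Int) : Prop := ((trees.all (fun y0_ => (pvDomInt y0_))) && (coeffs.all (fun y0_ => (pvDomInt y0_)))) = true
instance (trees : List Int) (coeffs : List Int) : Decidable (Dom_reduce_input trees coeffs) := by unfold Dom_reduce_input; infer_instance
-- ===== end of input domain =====

-- B replaces A's quadratic all-pairs scan with a single dict pass grouping indices by tree
-- (objective: faster, asymptotic). Equivalence is about return values (A mutates nothing).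

-- ===== PORT A =====
-- A-side helpers: the two loop bodies of A, named so the proofs can talk about them.
-- added[i] reads/writes: the enumerate indices satisfy 0 ≤ i < len(trees), so
-- PySem.List.pyGetD / List.set at .toNat are exact for Python's added[i] here.
def pvAInner (coeffs : List Int) (p : Int × Int)
    (s2 : List Bool × List Int × List Int) (q : Int × Int) :
    List Bool × List Int × List Int :=
  if p.1 ≠ q.1 then
    if p.2 = q.2 then
      let added' := (s2.1.set p.1.toNat true).set q.1.toNat true
      let cf := PySem.List.pyGetD coeffs p.1 0 + PySem.List.pyGetD coeffs q.1 0
      if cf ≠ 0 then (added', s2.2.1 ++ [p.2], s2.2.2 ++ [cf])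
      else (added', s2.2.1, s2.2.2)
    else s2
  else s2

def pvAOuter (trees coeffs : List Int)
    (s : List Bool × List Int × List Int) (p : Int × Int) :
    List Bool × List Int × List Int :=
  if PySem.List.pyGetD s.1 p.1 false = false then
    (PySem.List.enumerate trees).foldl (pvAInner coeffs p) s
  else s

def pvAFinal (coeffs : List Int) (added : List Bool)
    (s : List Int × List Int) (p : Int × Int) : List Int × List Int :=
  if PySem.List.pyGetD added p.1 false = false then
    (s.1 ++ [p.2], s.2 ++ [PySem.List.pyGetD coeffs p.1 0])
  else s

def reduce_input (trees : List Int) (coeffs : List Int) : List Int × List Int :=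
  let st := (PySem.List.enumerate trees).foldl (pvAOuter trees coeffs)
    (List.replicate trees.length false, [], [])
  (PySem.List.enumerate trees).foldl (pvAFinal coeffs st.1) (st.2.1, st.2.2)

-- ===== PORT B =====
-- B-side helpers: the loop bodies of B (grouping pass, per-group emission, singletons).
def pvBGroup (d : PySem.Dict Int (List Int)) (p : Int × Int) : PySem.Dict Int (List Int) :=
  d.modify p.2 [] (fun l => l ++ [p.1])

def pvBPair (coeffs : List Int) (g : Int × List Int)
    (s2 : List Int × List Int × List Int) (j : Int) :
    List Int × List Int × List Int :=
  let cf := PySem.List.pyGetD coeffs (PySem.List.pyGetD g.2 0 0) 0 + PySem.List.pyGetD coeffs j 0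
  if cf ≠ 0 then (s2.1 ++ [g.1], s2.2.1 ++ [cf], s2.2.2) else s2

def pvBItem (coeffs : List Int)
    (s : List Int × List Int × List Int) (g : Int × List Int) :
    List Int × List Int × List Int :=
  if 1 < PySem.List.len g.2 then
    (PySem.List.slice g.2 (some 1) none).foldl (pvBPair coeffs g) s
  else (s.1, s.2.1, s.2.2 ++ [PySem.List.pyGetD g.2 0 0])

def pvBSingle (trees coeffs : List Int)
    (s : List Int × List Int) (i : Int) : List Int × List Int :=
  (s.1 ++ [PySem.List.pyGetD trees i 0], s.2 ++ [PySem.List.pyGetD coeffs i 0])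

def reduce_input_alt (trees : List Int) (coeffs : List Int) : List Int × List Int :=
  let groups : PySem.Dict Int (List Int) :=
    (PySem.List.enumerate trees).foldl pvBGroup PySem.Dict.empty
  let st := groups.items.foldl (pvBItem coeffs) ([], [], [])
  st.2.2.foldl (pvBSingle trees coeffs) (st.1, st.2.1)

-- ===== PRECONDITION & SPEC =====
-- Pre_ excludes exactly the inputs where Python A raises IndexError:
-- A reads coeffs[i] for every index i of trees, so it needs len(trees) ≤ len(coeffs).
def Pre_reduce_input (trees : List Int) (coeffs : List Int) : Prop :=
  trees.length ≤ coeffs.length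
instance (trees : List Int) (coeffs : List Int) : Decidable (Pre_reduce_input trees coeffs) := by
  unfold Pre_reduce_input; infer_instance

def pvWitness_reduce_input : List Int × List Int := ([1, 1, 2], [1, 2, 3])

def Spec_reduce_input (trees : List Int) (coeffs : List Int) (out : List Int × List Int) : Prop :=
  out = reduce_input_alt trees coeffs
instance (trees : List Int) (coeffs : List Int) (out : List Int × List Int) :
    Decidable (Spec_reduce_input trees coeffs out) := by
  unfold Spec_reduce_input; infer_instance

-- ===== CLAIM (what is proved, stated in full; the proofs are below) =====
def Claim_equal_reduce_input : Prop :=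
  ∀ (trees : List Int) (coeffs : List Int), Dom_reduce_input trees coeffs →
    Pre_reduce_input trees coeffs →
    Spec_reduce_input trees coeffs (reduce_input trees coeffs)

-- ===== LEMMAS AND PROOFS =====

-- The common canonical form both ports are proved equal to:
-- per distinct tree value t (first-occurrence order) the nonzero sums
-- coeffs[first t] + coeffs[j] over the later occurrences j of t, followed by
-- the coefficient-unchanged singleton trees in index order.
def pvC (coeffs : List Int) (j : Int) : Int := PySem.List.pyGetD coeffs j 0

def pvIdx (trees : List Int) (t : Int) : List Int :=
  ((PySem.List.enumerate trees).filter (fun q => decide (q.2 = t))).map (·.1)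

def pvCfs (trees coeffs : List Int) (t : Int) : List Int :=
  match pvIdx trees t with
  | [] => []
  | i :: rest => (rest.map (fun j => pvC coeffs i + pvC coeffs j)).filter (fun c => decide (c ≠ 0))

def pvSingles (trees : List Int) : List (Int × Int) :=
  (PySem.List.enumerate trees).filter (fun q => decide (trees.count q.2 = 1))

def pvCanon (trees coeffs : List Int) : List Int × List Int :=
  ((PySem.List.dedup trees).flatMap (fun t => (pvCfs trees coeffs t).map (fun _ => t))
     ++ (pvSingles trees).map (·.2),
   (PySem.List.dedup trees).flatMap (pvCfs trees coeffs)
     ++ (pvSingles trees).map (fun q => pvC coeffs q.1))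

-- ---- facts about enumerate ----
lemma pvE_mem {trees : List Int} {p : Int × Int} (h : p ∈ PySem.List.enumerate trees) :
    ∃ (k : Nat) (hk : k < trees.length), p = ((k : Int), trees[k]) := by
  rw [PySem.List.mem_enumerate_iff] at h
  obtain ⟨k, hk, hp⟩ := h
  exact ⟨k, hk, by simpa using hp⟩

lemma pvE_fst_nonneg {trees : List Int} {p : Int × Int} (h : p ∈ PySem.List.enumerate trees) :
    0 ≤ p.1 := by
  obtain ⟨k, hk, rfl⟩ := pvE_mem h; simp

lemma pvE_fst_lt {trees : List Int} {p : Int × Int} (h : p ∈ PySem.List.enumerate trees) :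
    p.1.toNat < trees.length := by
  obtain ⟨k, hk, rfl⟩ := pvE_mem h; simpa using hk

lemma pvE_inj {trees : List Int} {p q : Int × Int} (hp : p ∈ PySem.List.enumerate trees)
    (hq : q ∈ PySem.List.enumerate trees) (h : p.1 = q.1) : p = q := by
  obtain ⟨k, hk, rfl⟩ := pvE_mem hp
  obtain ⟨k', hk', rfl⟩ := pvE_mem hq
  simp only at h
  have hkk : k = k' := by exact_mod_cast h
  subst hkk; rfl

lemma pvE_count (trees : List Int) (t : Int) :
    ((PySem.List.enumerate trees).filter (fun q => decide (q.2 = t))).length = trees.count t := by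
  have h1 : trees.count t = trees.countP (fun x => decide (x = t)) := by
    rw [List.count_eq_countP]
    apply List.countP_congr
    intro x _
    by_cases h : x = t <;> simp [h]
  rw [h1, List.countP_eq_length_filter]
  have h3 : trees = (PySem.List.enumerate trees).map (·.2) :=
    (PySem.List.map_snd_enumerate trees 0).symm
  conv_rhs => rw [h3]
  rw [List.filter_map, List.length_map]
  rfl

lemma pvE_count_ge_two {trees : List Int} {p q : Int × Int}
    (hp : p ∈ PySem.List.enumerate trees) (hq : q ∈ PySem.List.enumerate trees)
    (hne : p.1 ≠ q.1) (hv : p.2 = q.2) : 2 ≤ trees.count p.2 := by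
  rw [← pvE_count trees p.2]
  have hp' : p ∈ (PySem.List.enumerate trees).filter (fun q => decide (q.2 = p.2)) := by
    simp [List.mem_filter, hp]
  have hq' : q ∈ (PySem.List.enumerate trees).filter (fun r => decide (r.2 = p.2)) := by
    simp [List.mem_filter, hq, hv]
  have hpq : p ≠ q := fun h => hne (congrArg Prod.fst h)
  obtain ⟨l₁, l₂, hsplit⟩ := List.append_of_mem hp'
  rw [hsplit] at hq' ⊢
  simp only [List.length_append, List.length_cons]
  rcases List.mem_append.1 hq' with h1 | h1
  · have := List.length_pos_of_mem h1; omega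
  · rcases List.mem_cons.1 h1 with h2 | h2
    · exact absurd h2.symm hpq
    · have := List.length_pos_of_mem h2; omega

lemma pvE_exists_other {trees : List Int} {p : Int × Int}
    (hp : p ∈ PySem.List.enumerate trees) (h2 : 2 ≤ trees.count p.2) :
    ∃ q ∈ PySem.List.enumerate trees, q.1 ≠ p.1 ∧ q.2 = p.2 := by
  by_contra hcon
  push_neg at hcon
  have hall : ∀ q ∈ (PySem.List.enumerate trees).filter (fun r => decide (r.2 = p.2)), q = p := by
    intro q hq
    have hqe := List.mem_filter.1 hq
    have hq2 : q.2 = p.2 := by simpa using hqe.2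
    by_cases hfst : q.1 = p.1
    · exact pvE_inj hqe.1 hp hfst
    · exact absurd hq2 (hcon q hqe.1 hfst)
  have hp' : p ∈ (PySem.List.enumerate trees).filter (fun r => decide (r.2 = p.2)) := by
    simp [List.mem_filter, hp]
  have hnd : ((PySem.List.enumerate trees).filter (fun r => decide (r.2 = p.2))).Nodup := by
    have hpw := PySem.List.pairwise_lt_enumerate (xs := trees) (s := 0)
    have : (PySem.List.enumerate trees).Nodup :=
      hpw.imp (fun h heq => by subst heq; omega)
    exact this.filter _
  rw [← pvE_count trees p.2] at h2
  rcases hflt : (PySem.List.enumerate trees).filter (fun r => decide (r.2 = p.2)) with _ | ⟨a, rest⟩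
  · rw [hflt] at hp'; simp at hp'
  · rcases rest with _ | ⟨b, rest'⟩
    · rw [hflt] at h2; simp at h2
    · rw [hflt] at hall hnd
      have ha : a = p := hall a (by simp)
      have hb : b = p := hall b (by simp)
      rw [List.nodup_cons] at hnd
      exact hnd.1 (by rw [ha, hb]; exact List.mem_cons_self ..)

lemma pvE_count_pos {trees : List Int} {p : Int × Int}
    (hp : p ∈ PySem.List.enumerate trees) : 1 ≤ trees.count p.2 := by
  have : p.2 ∈ trees := by
    have := List.mem_map_of_mem (f := (·.2)) hp
    rwa [PySem.List.map_snd_enumerate] at this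
  exact List.count_pos_iff.2 this

-- ---- A side ----
def pvMark (i t : Int) (a : List Bool) (q : Int × Int) : List Bool :=
  if i ≠ q.1 then if t = q.2 then (a.set i.toNat true).set q.1.toNat true else a else a

def pvEmit (coeffs : List Int) (i t : Int) (l : List (Int × Int)) : List Int :=
  ((l.filter (fun q => decide (i ≠ q.1) && decide (t = q.2))).map
      (fun q => pvC coeffs i + pvC coeffs q.1)).filter (fun c => decide (c ≠ 0))

lemma pvEmit_cons (coeffs : List Int) (i t : Int) (q : Int × Int) (l : List (Int × Int)) :
    pvEmit coeffs i t (q :: l)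
      = (if i ≠ q.1 ∧ t = q.2 ∧ pvC coeffs i + pvC coeffs q.1 ≠ 0
          then [pvC coeffs i + pvC coeffs q.1] else []) ++ pvEmit coeffs i t l := by
  simp only [pvEmit, List.filter_cons]
  by_cases h1 : i ≠ q.1 <;> by_cases h2 : t = q.2 <;>
    by_cases h3 : pvC coeffs i + pvC coeffs q.1 ≠ 0 <;>
    simp [h1, h2, h3]

lemma pvA_inner_split (coeffs : List Int) (i t : Int) :
    ∀ (l : List (Int × Int)) (a : List Bool) (rt rc : List Int),
      l.foldl (pvAInner coeffs (i, t)) (a, rt, rc)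
        = (l.foldl (pvMark i t) a,
           rt ++ (pvEmit coeffs i t l).map (fun _ => t),
           rc ++ pvEmit coeffs i t l) := by
  intro l
  induction l with
  | nil => intro a rt rc; simp [pvEmit]
  | cons q l ih =>
    intro a rt rc
    by_cases h1 : i ≠ q.1
    · by_cases h2 : t = q.2
      · by_cases h3 : pvC coeffs i + pvC coeffs q.1 ≠ 0
        · have hstep : pvAInner coeffs (i, t) (a, rt, rc) q
              = ((a.set i.toNat true).set q.1.toNat true,
                 rt ++ [t], rc ++ [pvC coeffs i + pvC coeffs q.1]) := by
            simp only [pvC] at h3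
            simp [pvAInner, pvC, h1, h2, h3]
          have hm : pvMark i t a q = (a.set i.toNat true).set q.1.toNat true := by
            simp [pvMark, h1, h2]
          rw [List.foldl_cons, List.foldl_cons, hstep, ih, hm, pvEmit_cons]
          simp [h1, h2, h3]
        · have hstep : pvAInner coeffs (i, t) (a, rt, rc) q
              = ((a.set i.toNat true).set q.1.toNat true, rt, rc) := by
            simp only [pvC, not_not] at h3
            simp [pvAInner, h1, h2, h3]
          have hm : pvMark i t a q = (a.set i.toNat true).set q.1.toNat true := by
            simp [pvMark, h1, h2]
          rw [List.foldl_cons, List.foldl_cons, hstep, ih, hm, pvEmit_cons]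
          simp [h1, h2, h3]
      · have hstep : pvAInner coeffs (i, t) (a, rt, rc) q = (a, rt, rc) := by
          simp [pvAInner, h1, h2]
        have hm : pvMark i t a q = a := by simp [pvMark, h1, h2]
        rw [List.foldl_cons, List.foldl_cons, hstep, ih, hm, pvEmit_cons]
        simp [h1, h2]
    · have hstep : pvAInner coeffs (i, t) (a, rt, rc) q = (a, rt, rc) := by
        simp [pvAInner, h1]
      have hm : pvMark i t a q = a := by simp [pvMark, h1]
      rw [List.foldl_cons, List.foldl_cons, hstep, ih, hm, pvEmit_cons]
      simp [h1]

lemma pvMark_length (i t : Int) :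
    ∀ (l : List (Int × Int)) (a : List Bool), (l.foldl (pvMark i t) a).length = a.length := by
  intro l
  induction l with
  | nil => intro a; rfl
  | cons q l ih =>
    intro a
    rw [List.foldl_cons, ih]
    unfold pvMark
    split_ifs <;> simp

lemma pvMark_getD (i t : Int) :
    ∀ (l : List (Int × Int)) (a : List Bool), i.toNat < a.length →
      (∀ q ∈ l, q.1.toNat < a.length) → ∀ (m : Nat),
      (l.foldl (pvMark i t) a).getD m false
        = (a.getD m false ||
           l.any (fun q => decide (i ≠ q.1) && decide (t = q.2)
                           && (decide (m = i.toNat) || decide (m = q.1.toNat)))) := by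
  intro l
  induction l with
  | nil => intro a _ _ m; simp
  | cons q l ih =>
    intro a hi hq m
    have hstep : (pvMark i t a q).getD m false
        = (a.getD m false || (decide (i ≠ q.1) && decide (t = q.2)
            && (decide (m = i.toNat) || decide (m = q.1.toNat)))) := by
      unfold pvMark
      split_ifs with h1 h2
      · have hq1 : q.1.toNat < (a.set i.toNat true).length := by
          simpa using hq q (by simp)
        by_cases e1 : m = q.1.toNat
        · subst e1
          simp [List.getD_eq_getElem?_getD, List.getElem?_set_self hq1, h1, h2]
        · rw [List.getD_eq_getElem?_getD, List.getElem?_set_ne (by omega)]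
          by_cases e2 : m = i.toNat
          · subst e2
            simp [List.getElem?_set_self hi, h1, h2]
          · rw [List.getElem?_set_ne (by omega)]
            simp [h1, h2, e1, e2, List.getD_eq_getElem?_getD]
      · simp [h1, h2]
      · simp [h1]
    have hlen : (pvMark i t a q).length = a.length := by
      unfold pvMark; split_ifs <;> simp
    rw [List.foldl_cons, ih (pvMark i t a q) (by omega) (fun r hr => by rw [hlen]; exact hq r (by simp [hr])) m]
    rw [hstep]
    simp [Bool.or_assoc]

def pvFirsts (seen : List Int) : List (Int × Int) → List (Int × Int)
  | [] => []
  | p :: l => if p.2 ∈ seen then pvFirsts seen l else p :: pvFirsts (p.2 :: seen) l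

lemma pvGetD_toNat {trees : List Int} {q : Int × Int} (hq : q ∈ PySem.List.enumerate trees)
    (a : List Bool) : PySem.List.pyGetD a q.1 false = a.getD q.1.toNat false := by
  obtain ⟨k, hk, rfl⟩ := pvE_mem hq
  simp [PySem.List.pyGetD_natCast]

lemma pvMarkE_inv (trees : List Int) (i t : Int) (a : List Bool) (seen : List Int)
    (hit : (i, t) ∈ PySem.List.enumerate trees)
    (hlen : a.length = trees.length)
    (hts : t ∉ seen)
    (hinv : ∀ q ∈ PySem.List.enumerate trees,
      (PySem.List.pyGetD a q.1 false = true ↔ (q.2 ∈ seen ∧ 2 ≤ trees.count q.2))) :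
    ∀ q ∈ PySem.List.enumerate trees,
      (PySem.List.pyGetD ((PySem.List.enumerate trees).foldl (pvMark i t) a) q.1 false = true
        ↔ (q.2 ∈ t :: seen ∧ 2 ≤ trees.count q.2)) := by
  intro q hq
  have hi : i.toNat < a.length := by
    rw [hlen]; exact pvE_fst_lt (p := (i, t)) hit
  have hb : ∀ r ∈ PySem.List.enumerate trees, r.1.toNat < a.length := by
    intro r hr; rw [hlen]; exact pvE_fst_lt hr
  rw [pvGetD_toNat hq, pvMark_getD i t (PySem.List.enumerate trees) a hi hb q.1.toNat]
  by_cases hqt : q.2 = t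
  · have haq : a.getD q.1.toNat false = false := by
      rw [← pvGetD_toNat hq]
      rcases h : PySem.List.pyGetD a q.1 false with _ | _
      · rfl
      · exact absurd ((hinv q hq).1 h).1 (by rw [hqt]; exact hts)
    rw [haq]
    simp only [Bool.false_or, List.any_eq_true]
    constructor
    · rintro ⟨r, hr, hf⟩
      simp only [Bool.and_eq_true, Bool.or_eq_true, decide_eq_true_eq] at hf
      obtain ⟨⟨hir, htr⟩, hm⟩ := hf
      have h0q : 0 ≤ q.1 := pvE_fst_nonneg hq
      have h0i : 0 ≤ i := pvE_fst_nonneg (p := (i, t)) hit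
      have h0r : 0 ≤ r.1 := pvE_fst_nonneg hr
      refine ⟨by simp [hqt], ?_⟩
      rcases hm with hm | hm
      · -- q.1 = i, so q = (i,t); r is another occurrence
        have hq1 : q.1 = i := by omega
        have : 2 ≤ trees.count r.2 := pvE_count_ge_two hr hit (by omega) (by simp [htr])
        rwa [← htr, ← hqt] at this
      · have hq1 : q.1 = r.1 := by omega
        have hqr : q = r := pvE_inj hq hr hq1
        have : 2 ≤ trees.count q.2 := pvE_count_ge_two hq hit (by omega) (by rw [hqt])
        exact this
    · rintro ⟨_, h2⟩
      have h2t : 2 ≤ trees.count t := by rwa [hqt] at h2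
      obtain ⟨r, hr, hri, hrt⟩ := pvE_exists_other hit h2t
      have h0q : 0 ≤ q.1 := pvE_fst_nonneg hq
      have h0i : 0 ≤ i := pvE_fst_nonneg (p := (i, t)) hit
      have h0r : 0 ≤ r.1 := pvE_fst_nonneg hr
      simp only at hri hrt
      by_cases hq1 : q.1 = i
      · refine ⟨r, hr, ?_⟩
        simp only [Bool.and_eq_true, Bool.or_eq_true, decide_eq_true_eq]
        exact ⟨⟨by omega, hrt.symm⟩, Or.inl (by omega)⟩
      · refine ⟨q, hq, ?_⟩
        simp only [Bool.and_eq_true, Bool.or_eq_true, decide_eq_true_eq]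
        exact ⟨⟨by omega, hqt.symm⟩, Or.inr trivial⟩
  · have hany : (PySem.List.enumerate trees).any
        (fun r => decide (i ≠ r.1) && decide (t = r.2)
          && (decide (q.1.toNat = i.toNat) || decide (q.1.toNat = r.1.toNat))) = false := by
      rw [List.any_eq_false]
      intro r hr
      simp only [Bool.and_eq_true, Bool.or_eq_true, decide_eq_true_eq, not_and, not_or]
      rintro ⟨hir, htr⟩
      have h0q : 0 ≤ q.1 := pvE_fst_nonneg hq
      have h0i : 0 ≤ i := pvE_fst_nonneg (p := (i, t)) hit
      have h0r : 0 ≤ r.1 := pvE_fst_nonneg hr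
      constructor
      · intro hm
        have hq1 : q.1 = i := by omega
        have : q = (i, t) := pvE_inj hq hit hq1
        exact hqt (by rw [this])
      · intro hm
        have hq1 : q.1 = r.1 := by omega
        have : q = r := pvE_inj hq hr hq1
        exact hqt (by rw [this, ← htr])
    rw [hany, Bool.or_false, ← pvGetD_toNat hq, hinv q hq]
    simp [hqt]

lemma pvA_outer_split (trees coeffs : List Int) :
    ∀ (l : List (Int × Int)) (seen : List Int) (a : List Bool) (rt rc : List Int),
      l.Sublist (PySem.List.enumerate trees) →
      a.length = trees.length →
      (∀ q ∈ PySem.List.enumerate trees,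
        (PySem.List.pyGetD a q.1 false = true ↔ (q.2 ∈ seen ∧ 2 ≤ trees.count q.2))) →
      (∀ q ∈ l, q.2 ∈ seen → 2 ≤ trees.count q.2) →
      ∃ a', l.foldl (pvAOuter trees coeffs) (a, rt, rc)
          = (a',
             rt ++ (pvFirsts seen l).flatMap
               (fun p => (pvEmit coeffs p.1 p.2 (PySem.List.enumerate trees)).map (fun _ => p.2)),
             rc ++ (pvFirsts seen l).flatMap
               (fun p => pvEmit coeffs p.1 p.2 (PySem.List.enumerate trees)))
        ∧ (∀ q ∈ PySem.List.enumerate trees,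
            (PySem.List.pyGetD a' q.1 false = true
              ↔ ((q.2 ∈ seen ∨ q.2 ∈ l.map (·.2)) ∧ 2 ≤ trees.count q.2))) := by
  intro l
  induction l with
  | nil =>
    intro seen a rt rc _ hlen hinv _
    exact ⟨a, by simp [pvFirsts], fun q hq => by rw [hinv q hq]; simp⟩
  | cons p l ih =>
    obtain ⟨i, t⟩ := p
    intro seen a rt rc hsub hlen hinv hseen
    have hpe : (i, t) ∈ PySem.List.enumerate trees := hsub.subset (by simp)
    have hlsub : l.Sublist (PySem.List.enumerate trees) :=
      (List.sublist_cons_self (i, t) l).trans hsub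
    by_cases hs : t ∈ seen
    · have h2 : 2 ≤ trees.count t := by simpa using hseen (i, t) (by simp) hs
      have hget : PySem.List.pyGetD a i false = true := by
        have := (hinv (i, t) hpe).2 ⟨hs, by simpa using h2⟩
        simpa using this
      have hstep : pvAOuter trees coeffs (a, rt, rc) (i, t) = (a, rt, rc) := by
        simp [pvAOuter, hget]
      obtain ⟨a', heq, hinv'⟩ := ih seen a rt rc hlsub hlen hinv
        (fun q hq hqs => hseen q (by simp [hq]) hqs)
      refine ⟨a', ?_, ?_⟩
      · rw [List.foldl_cons, hstep, heq]
        simp [pvFirsts, hs]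
      · intro q hq
        rw [hinv' q hq]
        by_cases hqp : q.2 = t <;> simp [hqp, hs]
    · have hget : PySem.List.pyGetD a i false = false := by
        rcases h : PySem.List.pyGetD a i false
        · rfl
        · have := (hinv (i, t) hpe).1 (by simpa using h)
          exact absurd this.1 hs
      have hstep : pvAOuter trees coeffs (a, rt, rc) (i, t)
          = ((PySem.List.enumerate trees).foldl (pvMark i t) a,
             rt ++ (pvEmit coeffs i t (PySem.List.enumerate trees)).map (fun _ => t),
             rc ++ pvEmit coeffs i t (PySem.List.enumerate trees)) := by
        simp only [pvAOuter]
        rw [if_pos (by simpa using hget)]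
        exact pvA_inner_split coeffs i t (PySem.List.enumerate trees) a rt rc
      have hlen2 : ((PySem.List.enumerate trees).foldl (pvMark i t) a).length = trees.length := by
        rw [pvMark_length]; exact hlen
      have hinv2 := pvMarkE_inv trees i t a seen hpe hlen hs hinv
      have hseen2 : ∀ q ∈ l, q.2 ∈ t :: seen → 2 ≤ trees.count q.2 := by
        intro q hql hqs
        rcases List.mem_cons.1 hqs with hqs | hqs
        · have hqe : q ∈ PySem.List.enumerate trees := hlsub.subset hql
          have hpl : ((i, t) :: l).Pairwise (fun p q => p.1 < q.1) :=
            (PySem.List.pairwise_lt_enumerate (xs := trees) (s := 0)).sublist hsub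
          have hlt : i < q.1 := (List.pairwise_cons.1 hpl).1 q hql
          exact pvE_count_ge_two hqe hpe (by simp; omega) (by simpa using hqs)
        · exact hseen q (by simp [hql]) hqs
      obtain ⟨a', heq, hinv'⟩ := ih (t :: seen)
        ((PySem.List.enumerate trees).foldl (pvMark i t) a)
        (rt ++ (pvEmit coeffs i t (PySem.List.enumerate trees)).map (fun _ => t))
        (rc ++ pvEmit coeffs i t (PySem.List.enumerate trees))
        hlsub hlen2 hinv2 hseen2
      refine ⟨a', ?_, ?_⟩
      · rw [List.foldl_cons, hstep, heq]
        simp [pvFirsts, hs, List.append_assoc]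
      · intro q hq
        rw [hinv' q hq]
        by_cases hqp : q.2 = t <;> simp [hqp, hs]

-- first occurrences: emission over the whole list equals the canonical per-group list
lemma pvFirsts_split {p : Int × Int} :
    ∀ (l : List (Int × Int)) (seen : List Int), p ∈ pvFirsts seen l →
      p.2 ∉ seen ∧ ∃ l₁ l₂, l = l₁ ++ p :: l₂ ∧ ∀ q ∈ l₁, q.2 ≠ p.2 := by
  intro l
  induction l with
  | nil => intro seen h; simp [pvFirsts] at h
  | cons r l ih =>
    intro seen h
    by_cases hr : r.2 ∈ seen
    · rw [pvFirsts, if_pos hr] at h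
      obtain ⟨hns, l₁, l₂, heq, hl₁⟩ := ih seen h
      refine ⟨hns, r :: l₁, l₂, by rw [heq]; rfl, ?_⟩
      intro q hq
      rcases List.mem_cons.1 hq with rfl | hq
      · exact fun he => hns (he ▸ hr)
      · exact hl₁ q hq
    · rw [pvFirsts, if_neg hr] at h
      rcases List.mem_cons.1 h with rfl | h
      · exact ⟨hr, [], l, rfl, by simp⟩
      · obtain ⟨hns, l₁, l₂, heq, hl₁⟩ := ih (r.2 :: seen) h
        have hp2 : p.2 ∉ seen := fun hc => hns (by simp [hc])
        have hrp : r.2 ≠ p.2 := fun hc => hns (by simp [hc])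
        refine ⟨hp2, r :: l₁, l₂, by rw [heq]; rfl, ?_⟩
        intro q hq
        rcases List.mem_cons.1 hq with rfl | hq
        · exact hrp
        · exact hl₁ q hq

lemma pvFirsts_congr : ∀ (l : List (Int × Int)) (s s' : List Int),
    (∀ x, x ∈ s ↔ x ∈ s') → pvFirsts s l = pvFirsts s' l := by
  intro l
  induction l with
  | nil => intro s s' _; rfl
  | cons r l ih =>
    intro s s' hss
    by_cases hr : r.2 ∈ s
    · rw [pvFirsts, if_pos hr, pvFirsts, if_pos ((hss r.2).1 hr)]
      exact ih s s' hss
    · rw [pvFirsts, if_neg hr, pvFirsts, if_neg (fun hc => hr ((hss r.2).2 hc))]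
      rw [ih (r.2 :: s) (r.2 :: s') (fun x => by simp [hss x])]

lemma pvFoldAdd_firsts : ∀ (l : List (Int × Int)) (seen : List Int),
    l.foldl (fun s q => PySem.Set.add s q.2) seen = seen ++ (pvFirsts seen l).map (·.2) := by
  intro l
  induction l with
  | nil => intro seen; simp [pvFirsts]
  | cons q l ih =>
    intro seen
    rw [List.foldl_cons]
    by_cases hq : q.2 ∈ seen
    · have hadd : PySem.Set.add seen q.2 = seen := by
        simp [PySem.Set.add, hq]
      rw [hadd, ih, pvFirsts, if_pos hq]
    · have hadd : PySem.Set.add seen q.2 = seen ++ [q.2] := by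
        simp [PySem.Set.add, hq]
      rw [hadd, ih, pvFirsts, if_neg hq]
      rw [pvFirsts_congr l (seen ++ [q.2]) (q.2 :: seen) (fun x => by simp [or_comm])]
      simp

lemma pvEmit_eq_cfs (trees coeffs : List Int) {p : Int × Int}
    (h : p ∈ pvFirsts [] (PySem.List.enumerate trees)) :
    pvEmit coeffs p.1 p.2 (PySem.List.enumerate trees) = pvCfs trees coeffs p.2 := by
  obtain ⟨-, l₁, l₂, heq, hl₁⟩ := pvFirsts_split (PySem.List.enumerate trees) [] h
  have hpw : (l₁ ++ p :: l₂).Pairwise (fun a b => a.1 < b.1) :=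
    heq ▸ PySem.List.pairwise_lt_enumerate (xs := trees) (s := 0)
  have hl₂ : ∀ q ∈ l₂, p.1 < q.1 := by
    have := (List.pairwise_append.1 hpw).2.1
    exact (List.pairwise_cons.1 this).1
  have hflt1 : l₁.filter (fun q => decide (p.1 ≠ q.1) && decide (p.2 = q.2)) = [] := by
    rw [List.filter_eq_nil_iff]
    intro q hq
    simp only [Bool.and_eq_true, decide_eq_true_eq, not_and]
    exact fun _ h2 => hl₁ q hq h2.symm
  have hflt1' : l₁.filter (fun q => decide (q.2 = p.2)) = [] := by
    rw [List.filter_eq_nil_iff]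
    intro q hq
    simpa using hl₁ q hq
  have hflt2 : l₂.filter (fun q => decide (p.1 ≠ q.1) && decide (p.2 = q.2))
      = l₂.filter (fun q => decide (q.2 = p.2)) := by
    apply List.filter_congr
    intro q hq
    have := hl₂ q hq
    by_cases h2 : q.2 = p.2
    · simp [h2]; omega
    · simp [h2]
      intro _ hc
      exact h2 hc.symm
  have hidx : pvIdx trees p.2 = p.1 :: (l₂.filter (fun q => decide (q.2 = p.2))).map (·.1) := by
    simp only [pvIdx]
    rw [heq, List.filter_append, hflt1', List.filter_cons]
    simp
  have hemit : (PySem.List.enumerate trees).filter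
      (fun q => decide (p.1 ≠ q.1) && decide (p.2 = q.2))
      = l₂.filter (fun q => decide (q.2 = p.2)) := by
    rw [heq, List.filter_append, hflt1, List.filter_cons, if_neg (by simp)]
    simpa using hflt2
  simp only [pvEmit, pvCfs, hidx, hemit, List.map_map]
  rfl

lemma pvFlatMap_congr {α β : Type} (l : List α) (f g : α → List β)
    (h : ∀ x ∈ l, f x = g x) : l.flatMap f = l.flatMap g := by
  induction l with
  | nil => rfl
  | cons x l ih =>
    rw [List.flatMap_cons, List.flatMap_cons, h x (by simp),
      ih (fun y hy => h y (by simp [hy]))]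

lemma pvFirsts_snd (trees : List Int) :
    (pvFirsts [] (PySem.List.enumerate trees)).map (·.2) = PySem.List.dedup trees := by
  have h0 : PySem.List.dedup trees = PySem.Set.ofList trees := by simp
  rw [h0, PySem.Set.ofList_eq_foldl]
  conv_rhs => rw [show trees = (PySem.List.enumerate trees).map (·.2) from
    (PySem.List.map_snd_enumerate trees 0).symm]
  rw [List.foldl_map, pvFoldAdd_firsts]
  simp

lemma pvA_final_split (trees coeffs : List Int) (a' : List Bool)
    (hfin : ∀ q ∈ PySem.List.enumerate trees,
      (PySem.List.pyGetD a' q.1 false = true ↔ 2 ≤ trees.count q.2)) :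
    ∀ (l : List (Int × Int)), (∀ q ∈ l, q ∈ PySem.List.enumerate trees) →
      ∀ (X Y : List Int),
      l.foldl (pvAFinal coeffs a') (X, Y)
        = (X ++ (l.filter (fun q => decide (trees.count q.2 = 1))).map (·.2),
           Y ++ (l.filter (fun q => decide (trees.count q.2 = 1))).map (fun q => pvC coeffs q.1)) := by
  intro l
  induction l with
  | nil => intro _ X Y; simp
  | cons q l ih =>
    intro hl X Y
    have hqe : q ∈ PySem.List.enumerate trees := hl q (by simp)
    have hpos := pvE_count_pos hqe
    rw [List.foldl_cons]
    by_cases hc : trees.count q.2 = 1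
    · have hget : PySem.List.pyGetD a' q.1 false = false := by
        rcases hg : PySem.List.pyGetD a' q.1 false
        · rfl
        · have := (hfin q hqe).1 hg; omega
      have hstep : pvAFinal coeffs a' (X, Y) q = (X ++ [q.2], Y ++ [pvC coeffs q.1]) := by
        simp [pvAFinal, hget, pvC]
      rw [hstep, ih (fun r hr => hl r (by simp [hr]))]
      simp [List.filter_cons, hc]
    · have hget : PySem.List.pyGetD a' q.1 false = true := (hfin q hqe).2 (by omega)
      have hstep : pvAFinal coeffs a' (X, Y) q = (X, Y) := by
        simp [pvAFinal, hget]
      rw [hstep, ih (fun r hr => hl r (by simp [hr]))]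
      simp [List.filter_cons, hc]

lemma pvFlat_firstsT (trees coeffs : List Int) :
    (pvFirsts [] (PySem.List.enumerate trees)).flatMap
        (fun p => (pvEmit coeffs p.1 p.2 (PySem.List.enumerate trees)).map (fun _ => p.2))
      = (PySem.List.dedup trees).flatMap
          (fun t => (pvCfs trees coeffs t).map (fun _ => t)) := by
  rw [pvFlatMap_congr _ _ (fun p => (pvCfs trees coeffs p.2).map (fun _ => p.2))
    (fun p hp => by rw [pvEmit_eq_cfs trees coeffs hp])]
  rw [← pvFirsts_snd trees, List.flatMap_map]

lemma pvFlat_firstsC (trees coeffs : List Int) :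
    (pvFirsts [] (PySem.List.enumerate trees)).flatMap
        (fun p => pvEmit coeffs p.1 p.2 (PySem.List.enumerate trees))
      = (PySem.List.dedup trees).flatMap (pvCfs trees coeffs) := by
  rw [pvFlatMap_congr _ _ (fun p => pvCfs trees coeffs p.2)
    (fun p hp => by rw [pvEmit_eq_cfs trees coeffs hp])]
  rw [← pvFirsts_snd trees, List.flatMap_map]

theorem pvA_eq_canon (trees coeffs : List Int) :
    reduce_input trees coeffs = pvCanon trees coeffs := by
  have hinv0 : ∀ q ∈ PySem.List.enumerate trees,
      (PySem.List.pyGetD (List.replicate trees.length false) q.1 false = true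
        ↔ (q.2 ∈ ([] : List Int) ∧ 2 ≤ trees.count q.2)) := by
    intro q hq
    rw [pvGetD_toNat hq]
    simp [List.getD_eq_getElem?_getD]
  obtain ⟨a', heq, hinv⟩ := pvA_outer_split trees coeffs (PySem.List.enumerate trees) []
    (List.replicate trees.length false) [] [] (List.Sublist.refl _) (by simp) hinv0 (by simp)
  have hfin : ∀ q ∈ PySem.List.enumerate trees,
      (PySem.List.pyGetD a' q.1 false = true ↔ 2 ≤ trees.count q.2) := by
    intro q hq
    rw [hinv q hq]
    have hm : q.2 ∈ trees := by
      have := List.mem_map_of_mem (f := (·.2)) hq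
      rwa [PySem.List.map_snd_enumerate] at this
    simp [hm]
  unfold reduce_input
  rw [heq]
  rw [pvA_final_split trees coeffs a' hfin (PySem.List.enumerate trees) (fun q hq => hq)]
  unfold pvCanon pvSingles
  rw [← pvFlat_firstsT trees coeffs, ← pvFlat_firstsC trees coeffs]
  simp

-- ---- B side ----
lemma pvB_groups_items (trees : List Int) :
    ((PySem.List.enumerate trees).foldl pvBGroup PySem.Dict.empty).items
      = (PySem.List.dedup trees).map (fun t => (t, pvIdx trees t)) := by
  have hfold : (PySem.List.enumerate trees).foldl pvBGroup PySem.Dict.empty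
      = (PySem.List.enumerate trees).foldl
          (fun d p => d.modify ((fun q : Int × Int => q.2) p) []
            ((fun (_ : PySem.Dict Int (List Int)) (p : Int × Int) (l : List Int) => l ++ [p.1])
              d p)) PySem.Dict.empty := rfl
  have hnd : ((PySem.List.enumerate trees).foldl pvBGroup PySem.Dict.empty).keys.Nodup := by
    rw [hfold]
    exact PySem.Dict.nodup_keys_foldl_modify_key _ _ _ _ _ PySem.Dict.nodup_keys_empty
  have hkeys : ((PySem.List.enumerate trees).foldl pvBGroup PySem.Dict.empty).keys
      = PySem.List.dedup trees := by
    rw [hfold, PySem.Dict.keys_foldl_modify_key]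
    have h1 : (PySem.Dict.empty : PySem.Dict Int (List Int)).keys = [] :=
      PySem.Dict.keys_empty
    rw [h1, PySem.Set.update_nil_left, PySem.List.map_snd_enumerate,
      PySem.List.dedup_eq_ofList]
  have hgetD : ∀ k : Int,
      ((PySem.List.enumerate trees).foldl pvBGroup PySem.Dict.empty).getD k []
        = pvIdx trees k := by
    intro k
    have hswap : (PySem.List.enumerate trees).foldl pvBGroup PySem.Dict.empty
        = ((PySem.List.enumerate trees).map (fun p => (p.2, p.1))).foldl
            (fun d p => d.modify p.1 [] (fun l => l ++ [p.2])) PySem.Dict.empty := by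
      rw [List.foldl_map]; rfl
    rw [hswap, PySem.Dict.getD_foldl_modify_append]
    have hemp : (PySem.Dict.empty : PySem.Dict Int (List Int)).getD k [] = [] := by
      simp [PySem.Dict.getD_empty]
    rw [hemp, List.nil_append, List.filter_map]
    simp only [pvIdx, List.map_map, Function.comp_def]
    exact congrArg _ (List.filter_congr (fun q _ => rfl))
  rw [PySem.Dict.items_eq_map_keys _ hnd [], hkeys]
  apply List.map_congr_left
  intro t _
  rw [hgetD t]

lemma pvBPair_split (coeffs : List Int) (g : Int × List Int) :
    ∀ (l : List Int) (rt rc sg : List Int),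
      l.foldl (pvBPair coeffs g) (rt, rc, sg)
        = (rt ++ ((l.map (fun j => pvC coeffs (PySem.List.pyGetD g.2 0 0) + pvC coeffs j)).filter
              (fun c => decide (c ≠ 0))).map (fun _ => g.1),
           rc ++ (l.map (fun j => pvC coeffs (PySem.List.pyGetD g.2 0 0) + pvC coeffs j)).filter
              (fun c => decide (c ≠ 0)),
           sg) := by
  intro l
  induction l with
  | nil => intro rt rc sg; simp
  | cons j l ih =>
    intro rt rc sg
    rw [List.foldl_cons]
    by_cases hcf : pvC coeffs (PySem.List.pyGetD g.2 0 0) + pvC coeffs j ≠ 0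
    · have hstep : pvBPair coeffs g (rt, rc, sg) j
          = (rt ++ [g.1], rc ++ [pvC coeffs (PySem.List.pyGetD g.2 0 0) + pvC coeffs j], sg) := by
        simp only [pvC] at hcf
        simp [pvBPair, pvC, hcf]
      rw [hstep, ih]
      simp [List.filter_cons, hcf]
    · have hstep : pvBPair coeffs g (rt, rc, sg) j = (rt, rc, sg) := by
        simp only [pvC, not_not] at hcf
        simp [pvBPair, hcf]
      rw [hstep, ih]
      simp [List.filter_cons, hcf]

lemma pvBSingle_split (trees coeffs : List Int) :
    ∀ (l : List Int) (rt rc : List Int),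
      l.foldl (pvBSingle trees coeffs) (rt, rc)
        = (rt ++ l.map (fun i => PySem.List.pyGetD trees i 0),
           rc ++ l.map (fun i => PySem.List.pyGetD coeffs i 0)) := by
  intro l
  induction l with
  | nil => intro rt rc; simp
  | cons i l ih =>
    intro rt rc
    rw [List.foldl_cons]
    have hstep : pvBSingle trees coeffs (rt, rc) i
        = (rt ++ [PySem.List.pyGetD trees i 0], rc ++ [PySem.List.pyGetD coeffs i 0]) := rfl
    rw [hstep, ih]
    simp

lemma pvB_items_split (coeffs : List Int) :
    ∀ (gs : List (Int × List Int)) (rt rc sg : List Int),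
      gs.foldl (pvBItem coeffs) (rt, rc, sg)
        = (rt ++ gs.flatMap (fun g =>
             if 1 < PySem.List.len g.2 then
               (((PySem.List.slice g.2 (some 1) none).map
                   (fun j => pvC coeffs (PySem.List.pyGetD g.2 0 0) + pvC coeffs j)).filter
                  (fun c => decide (c ≠ 0))).map (fun _ => g.1)
             else []),
           rc ++ gs.flatMap (fun g =>
             if 1 < PySem.List.len g.2 then
               ((PySem.List.slice g.2 (some 1) none).map
                   (fun j => pvC coeffs (PySem.List.pyGetD g.2 0 0) + pvC coeffs j)).filter
                  (fun c => decide (c ≠ 0))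
             else []),
           sg ++ gs.flatMap (fun g =>
             if 1 < PySem.List.len g.2 then [] else [PySem.List.pyGetD g.2 0 0])) := by
  intro gs
  induction gs with
  | nil => intro rt rc sg; simp
  | cons g gs ih =>
    intro rt rc sg
    rw [List.foldl_cons]
    by_cases hg : 1 < PySem.List.len g.2
    · have hstep : pvBItem coeffs (rt, rc, sg) g
          = (rt ++ (((PySem.List.slice g.2 (some 1) none).map
                (fun j => pvC coeffs (PySem.List.pyGetD g.2 0 0) + pvC coeffs j)).filter
                  (fun c => decide (c ≠ 0))).map (fun _ => g.1),
             rc ++ ((PySem.List.slice g.2 (some 1) none).map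
                (fun j => pvC coeffs (PySem.List.pyGetD g.2 0 0) + pvC coeffs j)).filter
                  (fun c => decide (c ≠ 0)),
             sg) := by
        simp only [pvBItem, if_pos hg]
        exact pvBPair_split coeffs g (PySem.List.slice g.2 (some 1) none) rt rc sg
      rw [hstep, ih]
      simp only [List.flatMap_cons, if_pos hg, List.append_assoc, List.nil_append]
    · have hstep : pvBItem coeffs (rt, rc, sg) g
          = (rt, rc, sg ++ [PySem.List.pyGetD g.2 0 0]) := by
        simp only [pvBItem, if_neg hg]
      rw [hstep, ih]
      simp only [List.flatMap_cons, if_neg hg, List.append_assoc, List.nil_append]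

lemma pvGetD_zero_cons {α : Type} (x : α) (xs : List α) (d : α) :
    PySem.List.pyGetD (x :: xs) 0 d = x := by
  have := PySem.List.pyGetD_natCast (x :: xs) 0 d
  simpa using this

lemma pvGroup_pairs (trees coeffs : List Int) (t : Int) :
    (if 1 < PySem.List.len (pvIdx trees t) then
       ((PySem.List.slice (pvIdx trees t) (some 1) none).map
          (fun j => pvC coeffs (PySem.List.pyGetD (pvIdx trees t) 0 0) + pvC coeffs j)).filter
         (fun c => decide (c ≠ 0))
     else []) = pvCfs trees coeffs t := by
  rcases hidx : pvIdx trees t with _ | ⟨i, rest⟩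
  · rw [if_neg (by simp [PySem.List.len_eq])]
    simp [pvCfs, hidx]
  · rcases rest with _ | ⟨j, rest'⟩
    · rw [if_neg (by simp [PySem.List.len_eq])]
      simp [pvCfs, hidx]
    · rw [if_pos (by simp [PySem.List.len_eq])]
      rw [PySem.List.slice_from_one, pvGetD_zero_cons]
      simp [pvCfs, hidx]

lemma pvFlatMap_ite_singleton {α β : Type} (p : α → Bool) (f : α → β) :
    ∀ l : List α, (l.flatMap fun x => if p x = true then [f x] else []) = (l.filter p).map f := by
  intro l
  induction l with
  | nil => rfl
  | cons x l ih =>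
    by_cases hx : p x = true <;>
      simp [List.flatMap_cons, List.filter_cons, hx, ih]

lemma pvSetFold_filter (P : Int → Bool) :
    ∀ (l acc : List Int),
      (∀ t ∈ l, P t = true → (t ∉ acc ∧ l.count t = 1)) →
      (l.foldl PySem.Set.add acc).filter P = acc.filter P ++ l.filter P := by
  intro l
  induction l with
  | nil => intro acc _; simp
  | cons x l ih =>
    intro acc h
    rw [List.foldl_cons]
    by_cases hx : x ∈ acc
    · have hadd : PySem.Set.add acc x = acc := by simp [PySem.Set.add, hx]
      have hPx : P x ≠ true := fun hPx => (h x (by simp) hPx).1 hx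
      rw [hadd, ih acc ?_]
      · rw [List.filter_cons, if_neg (by simpa using hPx)]
      · intro t ht hPt
        have h0 := h t (by simp [ht]) hPt
        have hne : t ≠ x := fun he => hPx (he ▸ hPt)
        refine ⟨h0.1, ?_⟩
        have h2 := h0.2
        rwa [List.count_cons_of_ne hne.symm] at h2
    · have hadd : PySem.Set.add acc x = acc ++ [x] := by simp [PySem.Set.add, hx]
      rw [hadd, ih (acc ++ [x]) ?_]
      · rw [List.filter_append, List.filter_cons]
        by_cases hPx : P x = true
        · rw [if_pos hPx]
          simp [hPx]
        · rw [if_neg hPx]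
          simp [hPx]
      · intro t ht hPt
        have h0 := h t (by simp [ht]) hPt
        have hne : t ≠ x := by
          intro he
          subst he
          have := h0.2
          rw [List.count_cons_self] at this
          have : l.count t = 0 := by omega
          exact (List.count_eq_zero.1 this) ht
        constructor
        · simp [hne, h0.1]
        · have h2 := h0.2
          rwa [List.count_cons_of_ne hne.symm] at h2

lemma pvDedup_filter (trees : List Int) (P : Int → Bool)
    (hP : ∀ t, P t = true → trees.count t = 1) :
    (PySem.List.dedup trees).filter P = trees.filter P := by
  rw [PySem.List.dedup_eq_ofList, PySem.Set.ofList_eq_foldl]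
  have := pvSetFold_filter P trees [] (fun t _ hPt => ⟨by simp, hP t hPt⟩)
  simpa using this

lemma pvIdx_count_one {trees : List Int} {q : Int × Int}
    (hq : q ∈ PySem.List.enumerate trees) (h1 : trees.count q.2 = 1) :
    pvIdx trees q.2 = [q.1] := by
  have hlen : ((PySem.List.enumerate trees).filter (fun r => decide (r.2 = q.2))).length = 1 := by
    rw [pvE_count]; exact h1
  obtain ⟨a, ha⟩ := List.length_eq_one_iff.1 hlen
  have hqm : q ∈ (PySem.List.enumerate trees).filter (fun r => decide (r.2 = q.2)) := by
    simp [List.mem_filter, hq]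
  rw [ha] at hqm
  have hqa : q = a := by simpa using hqm
  rw [pvIdx, ha, ← hqa]
  rfl

lemma pvTreeAt {trees : List Int} {q : Int × Int} (hq : q ∈ PySem.List.enumerate trees) :
    PySem.List.pyGetD trees q.1 0 = q.2 := by
  obtain ⟨k, hk, rfl⟩ := pvE_mem hq
  simp [PySem.List.pyGetD_natCast, List.getD_eq_getElem?_getD, List.getElem?_eq_getElem hk]

theorem pvB_eq_canon (trees coeffs : List Int) :
    reduce_input_alt trees coeffs = pvCanon trees coeffs := by
  have hlenidx : ∀ t, (pvIdx trees t).length = trees.count t := by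
    intro t
    simp only [pvIdx, List.length_map]
    exact pvE_count trees t
  have hPT : ((PySem.List.dedup trees).map (fun t => (t, pvIdx trees t))).flatMap
      (fun g => if 1 < PySem.List.len g.2 then
          (((PySem.List.slice g.2 (some 1) none).map
            (fun j => pvC coeffs (PySem.List.pyGetD g.2 0 0) + pvC coeffs j)).filter
              (fun c => decide (c ≠ 0))).map (fun _ => g.1)
        else [])
      = (PySem.List.dedup trees).flatMap (fun t => (pvCfs trees coeffs t).map (fun _ => t)) := by
    rw [List.flatMap_map]
    exact pvFlatMap_congr _ _ _ (fun t _ => by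
      show (if 1 < PySem.List.len (pvIdx trees t) then
          (((PySem.List.slice (pvIdx trees t) (some 1) none).map
            (fun j => pvC coeffs (PySem.List.pyGetD (pvIdx trees t) 0 0) + pvC coeffs j)).filter
              (fun c => decide (c ≠ 0))).map (fun _ => t)
        else []) = (pvCfs trees coeffs t).map (fun _ => t)
      rw [← pvGroup_pairs trees coeffs t]
      split_ifs <;> simp)
  have hPC : ((PySem.List.dedup trees).map (fun t => (t, pvIdx trees t))).flatMap
      (fun g => if 1 < PySem.List.len g.2 then
          ((PySem.List.slice g.2 (some 1) none).map
            (fun j => pvC coeffs (PySem.List.pyGetD g.2 0 0) + pvC coeffs j)).filter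
              (fun c => decide (c ≠ 0))
        else [])
      = (PySem.List.dedup trees).flatMap (pvCfs trees coeffs) := by
    rw [List.flatMap_map]
    exact pvFlatMap_congr _ _ _ (fun t _ => by
      show (if 1 < PySem.List.len (pvIdx trees t) then
          ((PySem.List.slice (pvIdx trees t) (some 1) none).map
            (fun j => pvC coeffs (PySem.List.pyGetD (pvIdx trees t) 0 0) + pvC coeffs j)).filter
              (fun c => decide (c ≠ 0))
        else []) = pvCfs trees coeffs t
      exact pvGroup_pairs trees coeffs t)
  have hfe : trees.filter (fun t => decide (trees.count t = 1)) = (pvSingles trees).map (·.2) := by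
    have h2 := List.filter_map (l := PySem.List.enumerate trees)
      (f := fun q : Int × Int => q.2) (p := fun t => decide (trees.count t = 1))
    rw [PySem.List.map_snd_enumerate] at h2
    exact h2
  have hmem : ∀ q ∈ pvSingles trees,
      q ∈ PySem.List.enumerate trees ∧ trees.count q.2 = 1 := by
    intro q hq
    have := List.mem_filter.1 hq
    exact ⟨this.1, by simpa using this.2⟩
  have hidx1 : ∀ q ∈ pvSingles trees,
      PySem.List.pyGetD (pvIdx trees q.2) 0 0 = q.1 := by
    intro q hq
    obtain ⟨hqe, hc⟩ := hmem q hq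
    rw [pvIdx_count_one hqe hc, pvGetD_zero_cons]
  have hS : ((PySem.List.dedup trees).map (fun t => (t, pvIdx trees t))).flatMap
      (fun g => if 1 < PySem.List.len g.2 then ([] : List Int)
        else [PySem.List.pyGetD g.2 0 0])
      = (pvSingles trees).map (·.1) := by
    rw [List.flatMap_map]
    rw [pvFlatMap_congr (PySem.List.dedup trees) _
        (fun t => if (decide (trees.count t = 1)) = true
          then [PySem.List.pyGetD (pvIdx trees t) 0 0] else [])
        (fun t ht => by
          show (if 1 < PySem.List.len (pvIdx trees t) then ([] : List Int)
              else [PySem.List.pyGetD (pvIdx trees t) 0 0])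
            = (if (decide (trees.count t = 1)) = true
                then [PySem.List.pyGetD (pvIdx trees t) 0 0] else [])
          have htm : t ∈ trees := (PySem.List.mem_dedup trees t).1 ht
          have hc1 : 1 ≤ trees.count t := List.count_pos_iff.2 htm
          have hl := hlenidx t
          rw [PySem.List.len_eq]
          by_cases h2 : 2 ≤ trees.count t
          · rw [if_pos (by omega), if_neg (by simp; omega)]
          · rw [if_neg (by omega), if_pos (by simp; omega)])]
    rw [pvFlatMap_ite_singleton]
    rw [pvDedup_filter trees _ (fun t ht => of_decide_eq_true ht)]
    rw [hfe, List.map_map]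
    apply List.map_congr_left
    intro q hq
    show PySem.List.pyGetD (pvIdx trees q.2) 0 0 = q.1
    exact hidx1 q hq
  simp only [reduce_input_alt]
  rw [pvB_groups_items, pvB_items_split]
  simp only []
  rw [pvBSingle_split, hPT, hPC, hS]
  simp only [List.nil_append]
  rw [List.map_map, List.map_map]
  unfold pvCanon
  congr 1
  · congr 1
    apply List.map_congr_left
    intro q hq
    show PySem.List.pyGetD trees q.1 0 = q.2
    exact pvTreeAt (List.mem_filter.1 hq).1

-- ===== VERDICT (by name: the statement is the Claim_ definition above) =====
theorem reduce_input_spec : Claim_equal_reduce_input := by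
  intro trees coeffs _ _
  unfold Spec_reduce_input
  rw [pvA_eq_canon, pvB_eq_canon]
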